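-- pv_equiv track=rewrite | github.com/StellaContrail/html2mdTables | main.py | _flatten_header_layers
-- ===== SOURCE A (Python) =====
-- from typing import List, Tuple
--
-- def _flatten_header_layers(grid: List[List[str]], header_layers: int) -> List[str]:
--     """
--     Flatten multi-row headers into a single row using 'Parent > Child'.
--     - Propagate the last non-empty header text to the right in each header layer
--       (to reflect colspan grouping).
--     - Avoid duplicate joins when the same text repeats via rowspan.
--     """
--     if not grid:
--         return []
--
--     cols = len(grid[0])
--     headers = ["" for _ in range(cols)]
--     prev_seg_per_col: List[str | None] = [None for _ in range(cols)]
--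
--     layers = min(header_layers, len(grid))
--     for r in range(layers):
--         layer = grid[r]
--
--         # Propagate the last non-empty segment to the right (colspan effect)
--         propagated = [""] * cols
--         current = ""
--         for c in range(cols):
--             if layer[c].strip():
--                 current = layer[c].strip()
--             propagated[c] = current
--
--         # Join per column, skipping duplicates from rowspan
--         for c in range(cols):
--             seg = propagated[c]
--             if not seg:
--                 continue
--             if prev_seg_per_col[c] == seg:
--                 # same text coming from rowspan above -> skip duplicate
--                 continue
--             headers[c] = seg if not headers[c] else f"{headers[c]} > {seg}"
--             prev_seg_per_col[c] = seg
--
--     # Fill unnamed columns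
--     for i in range(cols):
--         if not headers[i]:
--             headers[i] = f"col_{i+1}"
--
--     return headers
-- ===== SOURCE B (Python) =====
-- from typing import List
--
--
-- def _bisect_right(a: List[int], x: int) -> int:
--     """Rightmost insertion point in sorted a (hand-rolled; no imports)."""
--     lo, hi = 0, len(a)
--     while lo < hi:
--         mid = (lo + hi) // 2
--         if x < a[mid]:
--             hi = mid
--         else:
--             lo = mid + 1
--     return lo
--
--
-- def _flatten_header_layers(grid: List[List[str]], header_layers: int) -> List[str]:
--     """Run-index rewrite: each header row is compressed once into its runs
--     (start column, label) of non-empty stripped cells; a column's segment is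
--     then found by binary search for the last run starting at or before it,
--     which replaces the forward-fill propagation entirely."""
--     if not grid:
--         return []
--
--     cols = len(grid[0])
--     layers = min(header_layers, len(grid))
--
--     rows = []
--     for r in range(layers):
--         starts: List[int] = []
--         labels: List[str] = []
--         for c, cell in enumerate(grid[r][:cols]):
--             s = cell.strip()
--             if s:
--                 starts.append(c)
--                 labels.append(s)
--         rows.append((starts, labels))
--
--     out = []
--     for c in range(cols):
--         parts: List[str] = []
--         for starts, labels in rows:
--             i = _bisect_right(starts, c)
--             if i and (not parts or parts[-1] != labels[i - 1]):
--                 parts.append(labels[i - 1])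
--         out.append(" > ".join(parts) if parts else f"col_{c + 1}")
--     return out
-- ===== Notes on version B (the rewrite author's own statement) =====
-- stated objective: alternative
-- what changed: Replaces A's stateful forward-fill propagation (mutable headers/prev-segment arrays updated row by row) with a run-index algorithm: each header row is compressed once into sorted (start column, label) runs of its non-empty stripped cells, and each column's segment is found by a hand-rolled binary search for the last run starting at or before that column, then collapsed against the previous appended part and joined.
import Mathlib
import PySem

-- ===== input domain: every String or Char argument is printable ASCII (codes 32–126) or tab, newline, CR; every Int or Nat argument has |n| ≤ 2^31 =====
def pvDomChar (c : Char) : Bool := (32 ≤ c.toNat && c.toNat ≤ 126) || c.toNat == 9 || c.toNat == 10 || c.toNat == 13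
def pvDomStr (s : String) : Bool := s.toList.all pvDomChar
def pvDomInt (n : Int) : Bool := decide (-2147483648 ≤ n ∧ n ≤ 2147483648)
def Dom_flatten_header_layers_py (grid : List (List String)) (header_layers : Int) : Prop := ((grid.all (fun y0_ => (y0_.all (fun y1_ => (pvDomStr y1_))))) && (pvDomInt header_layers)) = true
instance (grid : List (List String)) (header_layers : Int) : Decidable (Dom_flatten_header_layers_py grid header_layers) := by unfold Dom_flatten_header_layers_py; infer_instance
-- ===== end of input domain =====

-- B replaces A's row-by-row forward-fill propagation by a run-index algorithm (per-row runs of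
-- non-empty cells + binary search per column); return values proved equal on Pre_.

-- ===== PORT A =====
def flatten_header_layers_py (grid : List (List String)) (header_layers : Int) : List String :=
  if grid = [] then []
  else
    let cols := grid.headI.length
    let headers0 : List String := List.replicate cols ""
    let prev0 : List (Option String) := List.replicate cols none
    let layers : Int := min header_layers (grid.length : Int)
    let st := (PySem.List.pyRange 0 layers 1).foldl
      (fun (st : List String × List (Option String)) r =>
        let layer := PySem.List.pyGetD grid r []
        -- propagate the last non-empty segment to the right
        let pc := (List.range cols).foldl
          (fun (pc : List String × String) c =>
            let current := if PySem.Str.strip (layer.getD c "") ≠ "" then PySem.Str.strip (layer.getD c "") else pc.2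
            (pc.1.set c current, current))
          (List.replicate cols "", "")
        -- join per column, skipping duplicates from rowspan
        (List.range cols).foldl
          (fun (st : List String × List (Option String)) c =>
            let seg := pc.1.getD c ""
            if seg = "" then st
            else if st.2.getD c none = some seg then st
            else (st.1.set c (if st.1.getD c "" = "" then seg else st.1.getD c "" ++ " > " ++ seg),
                  st.2.set c (some seg)))
          st)
      (headers0, prev0)
    -- fill unnamed columns
    (List.range cols).foldl
      (fun (hs : List String) i =>
        if hs.getD i "" = "" then hs.set i ("col_" ++ PySem.Int.toStr ((i : Int) + 1)) else hs)
      st.1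

-- ===== PORT B =====
-- hand-rolled bisect_right of Source B (while lo < hi: mid = (lo+hi)//2; …), ported literally
def pvBisectR (a : List Int) (x : Int) (lo hi : Nat) : Nat :=
  if lo < hi then
    let mid := (lo + hi) / 2
    if x < a.getD mid 0 then pvBisectR a x lo mid else pvBisectR a x (mid + 1) hi
  else lo
termination_by hi - lo
decreasing_by all_goals omega

def flatten_header_layers_py_alt (grid : List (List String)) (header_layers : Int) : List String :=
  if grid = [] then []
  else
    let cols := grid.headI.length
    let layers : Int := min header_layers (grid.length : Int)
    -- compress each header row into its runs: (start column, stripped label)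
    let rows := (PySem.List.pyRange 0 layers 1).foldl
      (fun (rows : List (List Int × List String)) r =>
        let row := PySem.List.pyGetD grid r []
        let sl := (PySem.List.enumerate (PySem.List.slice row none (some (cols : Int)))).foldl
          (fun (sl : List Int × List String) p =>
            let s := PySem.Str.strip p.2
            if s ≠ "" then (sl.1 ++ [p.1], sl.2 ++ [s]) else sl)
          ([], [])
        rows ++ [sl])
      []
    (List.range cols).map (fun c =>
      let parts := rows.foldl
        (fun (parts : List String) sl =>
          let i := pvBisectR sl.1 (Int.ofNat c) 0 sl.1.length
          if i ≠ 0 ∧ (parts = [] ∨ parts.getLast? ≠ some (sl.2.getD (i - 1) ""))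
          then parts ++ [sl.2.getD (i - 1) ""] else parts)
        []
      if parts ≠ [] then PySem.Str.join " > " parts else "col_" ++ PySem.Int.toStr (Int.ofNat c + 1))

-- ===== PRECONDITION & SPEC =====
-- Pre_ excludes exactly the inputs where the Python A raises IndexError: a header row
-- (among the first min(header_layers, len(grid)) rows) shorter than len(grid[0]).
def Pre_flatten_header_layers_py (grid : List (List String)) (header_layers : Int) : Prop :=
  ∀ row ∈ grid.take (min header_layers (grid.length : Int)).toNat, grid.headI.length ≤ row.length
instance (grid : List (List String)) (header_layers : Int) : Decidable (Pre_flatten_header_layers_py grid header_layers) := by unfold Pre_flatten_header_layers_py; infer_instance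

def pvWitness_flatten_header_layers_py : List (List String) × Int := ([["a", "b"], ["", "c"]], 2)

def Spec_flatten_header_layers_py (grid : List (List String)) (header_layers : Int) (out : List String) : Prop := out = flatten_header_layers_py_alt grid header_layers
instance (grid : List (List String)) (header_layers : Int) (out : List String) : Decidable (Spec_flatten_header_layers_py grid header_layers out) := by unfold Spec_flatten_header_layers_py; infer_instance

-- ===== CLAIM (what is proved, stated in full; the proofs are below) =====
def Claim_equal_flatten_header_layers_py : Prop := ∀ (grid : List (List String)) (header_layers : Int), Dom_flatten_header_layers_py grid header_layers → Pre_flatten_header_layers_py grid header_layers → Spec_flatten_header_layers_py grid header_layers (flatten_header_layers_py grid header_layers)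

-- ===== LEMMAS AND PROOFS =====

-- per-column step of A's "join" loop, as a pure state transformer
def pvStepA (hp : String × Option String) (seg : String) : String × Option String :=
  if seg = "" then hp
  else if hp.2 = some seg then hp
  else ((if hp.1 = "" then seg else hp.1 ++ " > " ++ seg), some seg)

-- reference per-column dedup step on a segment list
def pvStepB (segs : List String) (seg : String) : List String :=
  if seg ≠ "" ∧ (segs = [] ∨ segs.getLast? ≠ some seg) then segs ++ [seg] else segs

-- A's propagation of one row (append-built)
def pvPropRow (cols : Nat) (row : List String) : List String × String :=
  (List.range cols).foldl
    (fun (pc : List String × String) c =>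
      let cur := if PySem.Str.strip (row.getD c "") ≠ "" then PySem.Str.strip (row.getD c "") else pc.2
      (pc.1 ++ [cur], cur))
    ([], "")

def pvJoinH (segs : List String) : String := PySem.Str.join " > " segs

-- A's per-column state after consuming rows L
def pvColA (cols : Nat) (L : List (List String)) (c : Nat) : String × Option String :=
  L.foldl (fun hp row => pvStepA hp ((pvPropRow cols row).1.getD c "")) ("", none)

-- reference per-column segment list after consuming rows L
def pvColB (cols : Nat) (L : List (List String)) (c : Nat) : List String :=
  L.foldl (fun segs row => pvStepB segs ((pvPropRow cols row).1.getD c "")) []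

theorem pvFoldApp_len (row : List String) (l : List Nat) (pc : List String × String) :
    ((l.foldl
      (fun (pc : List String × String) c =>
        let cur := if PySem.Str.strip (row.getD c "") ≠ "" then PySem.Str.strip (row.getD c "") else pc.2
        (pc.1 ++ [cur], cur)) pc).1).length = pc.1.length + l.length := by
  induction l generalizing pc with
  | nil => simp
  | cons a t ih =>
    rw [List.foldl_cons, ih]
    simp only [List.length_append, List.length_cons, List.length_nil]
    omega

theorem pvPropA_aux (row : List String) (cols : Nat) :
    ∀ m, m ≤ cols →
    (List.range m).foldl
      (fun (pc : List String × String) c =>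
        let current := if PySem.Str.strip (row.getD c "") ≠ "" then PySem.Str.strip (row.getD c "") else pc.2
        (pc.1.set c current, current))
      (List.replicate cols "", "")
    = (((List.range m).foldl
        (fun (pc : List String × String) c =>
          let cur := if PySem.Str.strip (row.getD c "") ≠ "" then PySem.Str.strip (row.getD c "") else pc.2
          (pc.1 ++ [cur], cur)) ([], "")).1 ++ List.replicate (cols - m) "",
       ((List.range m).foldl
        (fun (pc : List String × String) c =>
          let cur := if PySem.Str.strip (row.getD c "") ≠ "" then PySem.Str.strip (row.getD c "") else pc.2
          (pc.1 ++ [cur], cur)) ([], "")).2) := by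
  intro m hm
  induction m with
  | zero => simp
  | succ k ih =>
    have hk : k ≤ cols := by omega
    have hlen : ((List.range k).foldl
        (fun (pc : List String × String) c =>
          let cur := if PySem.Str.strip (row.getD c "") ≠ "" then PySem.Str.strip (row.getD c "") else pc.2
          (pc.1 ++ [cur], cur)) ([], "")).1.length = k := by
      simpa using pvFoldApp_len row (List.range k) ([], "")
    rw [List.range_succ, List.foldl_append, List.foldl_append, ih hk]
    simp only [List.foldl_cons, List.foldl_nil]
    have hrepl : List.replicate (cols - k) "" = "" :: List.replicate (cols - (k + 1)) ("" : String) := by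
      have : cols - k = (cols - (k+1)) + 1 := by omega
      rw [this, List.replicate_succ]
    rw [hrepl]
    refine Prod.ext ?_ rfl
    simp only [List.set_append, hlen]
    simp

-- A's set-built propagation equals the append-built propagation
theorem pvPropA_eq (row : List String) (cols : Nat) :
    (List.range cols).foldl
      (fun (pc : List String × String) c =>
        let current := if PySem.Str.strip (row.getD c "") ≠ "" then PySem.Str.strip (row.getD c "") else pc.2
        (pc.1.set c current, current))
      (List.replicate cols "", "")
    = pvPropRow cols row := by
  have := pvPropA_aux row cols cols le_rfl
  simpa [pvPropRow] using this

theorem pvJoinA_aux (pr : List String) (cols : Nat) (hs : List String) (ps : List (Option String))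
    (hh : hs.length = cols) (hp : ps.length = cols) :
    ∀ m, m ≤ cols →
    (List.range m).foldl
      (fun (st : List String × List (Option String)) c =>
        let seg := pr.getD c ""
        if seg = "" then st
        else if st.2.getD c none = some seg then st
        else (st.1.set c (if st.1.getD c "" = "" then seg else st.1.getD c "" ++ " > " ++ seg),
              st.2.set c (some seg)))
      (hs, ps)
    = ((List.range m).map (fun c => (pvStepA (hs.getD c "", ps.getD c none) (pr.getD c "")).1) ++ hs.drop m,
       (List.range m).map (fun c => (pvStepA (hs.getD c "", ps.getD c none) (pr.getD c "")).2) ++ ps.drop m) := by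
  intro m hm
  induction m with
  | zero => simp
  | succ k ih =>
    have hk : k ≤ cols := by omega
    have hklt : k < cols := by omega
    have hkh : k < hs.length := by omega
    have hkp : k < ps.length := by omega
    have hlen1 : ((List.range k).map (fun c => (pvStepA (hs.getD c "", ps.getD c none) (pr.getD c "")).1)).length = k := by simp
    have hlen2 : ((List.range k).map (fun c => (pvStepA (hs.getD c "", ps.getD c none) (pr.getD c "")).2)).length = k := by simp
    have hdrop1 : hs.drop k = hs.getD k "" :: hs.drop (k + 1) := by
      rw [List.drop_eq_getElem_cons hkh, List.getD_eq_getElem hs "" hkh]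
    have hdrop2 : ps.drop k = ps.getD k none :: ps.drop (k + 1) := by
      rw [List.drop_eq_getElem_cons hkp, List.getD_eq_getElem ps none hkp]
    have hget1 : ∀ (P : List String), P.length = k → (P ++ hs.drop k).getD k "" = hs.getD k "" := by
      intro P hP
      rw [hdrop1, List.getD_eq_getElem?_getD, List.getElem?_append_right (by omega), hP]
      simp
    have hget2 : ∀ (P : List (Option String)), P.length = k → (P ++ ps.drop k).getD k none = ps.getD k none := by
      intro P hP
      rw [hdrop2, List.getD_eq_getElem?_getD, List.getElem?_append_right (by omega), hP]
      simp
    have hset1 : ∀ (P : List String) v, P.length = k → (P ++ hs.drop k).set k v = P ++ v :: hs.drop (k + 1) := by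
      intro P v hP
      rw [hdrop1, List.set_append, hP]
      simp
    have hset2 : ∀ (P : List (Option String)) v, P.length = k → (P ++ ps.drop k).set k v = P ++ v :: ps.drop (k + 1) := by
      intro P v hP
      rw [hdrop2, List.set_append, hP]
      simp
    rw [List.range_succ, List.foldl_append, ih hk, List.foldl_cons, List.foldl_nil,
      List.map_append, List.map_append, List.map_singleton, List.map_singleton]
    simp only []
    by_cases hseg : pr.getD k "" = ""
    · have hv1 : (pvStepA (hs.getD k "", ps.getD k none) (pr.getD k "")).1 = hs.getD k "" := by
        simp only [pvStepA]; rw [if_pos hseg]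
      have hv2 : (pvStepA (hs.getD k "", ps.getD k none) (pr.getD k "")).2 = ps.getD k none := by
        simp only [pvStepA]; rw [if_pos hseg]
      rw [if_pos hseg, hv1, hv2, List.append_assoc, List.append_assoc,
        List.singleton_append, List.singleton_append, ← hdrop1, ← hdrop2]
    · rw [if_neg hseg, hget2 _ hlen2]
      by_cases hdup : ps.getD k none = some (pr.getD k "")
      · have hv1 : (pvStepA (hs.getD k "", ps.getD k none) (pr.getD k "")).1 = hs.getD k "" := by
          simp only [pvStepA]; rw [if_neg hseg, if_pos hdup]
        have hv2 : (pvStepA (hs.getD k "", ps.getD k none) (pr.getD k "")).2 = ps.getD k none := by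
          simp only [pvStepA]; rw [if_neg hseg, if_pos hdup]
        rw [if_pos hdup, hv1, hv2, List.append_assoc, List.append_assoc,
          List.singleton_append, List.singleton_append, ← hdrop1, ← hdrop2]
      · rw [if_neg hdup, hget1 _ hlen1, hset1 _ _ hlen1, hset2 _ _ hlen2]
        have hv1 : (pvStepA (hs.getD k "", ps.getD k none) (pr.getD k "")).1
            = (if hs.getD k "" = "" then pr.getD k "" else hs.getD k "" ++ " > " ++ pr.getD k "") := by
          simp only [pvStepA]; rw [if_neg hseg, if_neg hdup]
        have hv2 : (pvStepA (hs.getD k "", ps.getD k none) (pr.getD k "")).2 = some (pr.getD k "") := by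
          simp only [pvStepA]; rw [if_neg hseg, if_neg hdup]
        rw [hv1, hv2, List.append_assoc, List.append_assoc, List.singleton_append, List.singleton_append]

-- A's inner join loop acts pointwise
theorem pvJoinA_eq (pr : List String) (cols : Nat) (hs : List String) (ps : List (Option String))
    (hh : hs.length = cols) (hp : ps.length = cols) :
    (List.range cols).foldl
      (fun (st : List String × List (Option String)) c =>
        let seg := pr.getD c ""
        if seg = "" then st
        else if st.2.getD c none = some seg then st
        else (st.1.set c (if st.1.getD c "" = "" then seg else st.1.getD c "" ++ " > " ++ seg),
              st.2.set c (some seg)))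
      (hs, ps)
    = ((List.range cols).map (fun c => (pvStepA (hs.getD c "", ps.getD c none) (pr.getD c "")).1),
       (List.range cols).map (fun c => (pvStepA (hs.getD c "", ps.getD c none) (pr.getD c "")).2)) := by
  have := pvJoinA_aux pr cols hs ps hh hp cols le_rfl
  rw [this, List.drop_eq_nil_of_le (by omega), List.drop_eq_nil_of_le (by omega),
    List.append_nil, List.append_nil]

-- join facts
theorem pvJoin_nil : pvJoinH [] = "" := by simp [pvJoinH, PySem.Str.join]

theorem pvJoin_singleton (x : String) : pvJoinH [x] = x := by
  simp [pvJoinH, PySem.Str.join, PySem.Chars.join_singleton]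

theorem pvChJ (sep : List Char) (l : List (List Char)) (x : List Char) (hl : l ≠ []) :
    PySem.Chars.join sep (l ++ [x]) = PySem.Chars.join sep l ++ sep ++ x := by
  induction l with
  | nil => simp at hl
  | cons a t ih =>
    cases t with
    | nil => simp [PySem.Chars.join_cons_cons, PySem.Chars.join_singleton]
    | cons b t' =>
      rw [List.cons_append, List.cons_append, PySem.Chars.join_cons_cons,
        PySem.Chars.join_cons_cons, ← List.cons_append, ih (by simp)]
      simp

theorem pvJoin_append (l : List String) (x : String) (hl : l ≠ []) :
    pvJoinH (l ++ [x]) = pvJoinH l ++ " > " ++ x := by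
  apply String.toList_inj.mp
  simp only [pvJoinH]
  rw [PySem.Str.toList_join, String.toList_append, String.toList_append, PySem.Str.toList_join]
  rw [List.map_append, List.map_singleton, pvChJ _ _ _ (by simpa using hl)]

theorem pvChNe (sep : List Char) (a : List Char) (t : List (List Char)) :
    ∃ r, PySem.Chars.join sep (a :: t) = a ++ r := by
  cases t with
  | nil => exact ⟨[], by simp [PySem.Chars.join_singleton]⟩
  | cons b t' => exact ⟨sep ++ PySem.Chars.join sep (b :: t'), by simp [PySem.Chars.join_cons_cons]⟩

theorem pvJoin_ne_empty (l : List String) (hl : l ≠ []) (hmem : "" ∉ l) : pvJoinH l ≠ "" := by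
  cases l with
  | nil => simp at hl
  | cons a t =>
    intro h
    have h2 : (pvJoinH (a :: t)).toList = [] := by rw [h]; rfl
    simp only [pvJoinH] at h2
    rw [PySem.Str.toList_join] at h2
    obtain ⟨r, hr⟩ := pvChNe (" > ".toList) a.toList (t.map String.toList)
    rw [List.map_cons] at h2
    rw [hr] at h2
    have ha : a.toList = [] := by cases (List.append_eq_nil_iff.mp h2); assumption
    have : a = "" := String.toList_inj.mp ha
    simp [this] at hmem

-- the column invariant: A's (header, prev) fold is the segment fold, joined
theorem pvCol_inv (ss : List String) (segs : List String) (hmem : "" ∉ segs) :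
    ss.foldl pvStepA (pvJoinH segs, segs.getLast?)
      = (pvJoinH (ss.foldl pvStepB segs), (ss.foldl pvStepB segs).getLast?)
    ∧ "" ∉ ss.foldl pvStepB segs := by
  induction ss generalizing segs with
  | nil => exact ⟨rfl, hmem⟩
  | cons seg ss ih =>
    simp only [List.foldl_cons]
    by_cases h0 : seg = ""
    · have hA : pvStepA (pvJoinH segs, segs.getLast?) seg = (pvJoinH segs, segs.getLast?) := by
        simp [pvStepA, h0]
      have hB : pvStepB segs seg = segs := by simp [pvStepB, h0]
      rw [hA, hB]; exact ih segs hmem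
    · by_cases h1 : segs.getLast? = some seg
      · have hA : pvStepA (pvJoinH segs, segs.getLast?) seg = (pvJoinH segs, segs.getLast?) := by
          simp [pvStepA, h0, h1]
        have hseg : segs ≠ [] := by intro h; rw [h] at h1; simp at h1
        have hB : pvStepB segs seg = segs := by simp [pvStepB, h0, h1, hseg]
        rw [hA, hB]; exact ih segs hmem
      · have hB : pvStepB segs seg = segs ++ [seg] := by simp [pvStepB, h0, h1]
        have hA : pvStepA (pvJoinH segs, segs.getLast?) seg
            = (pvJoinH (segs ++ [seg]), (segs ++ [seg]).getLast?) := by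
          simp only [pvStepA, h0, h1, ite_false]
          by_cases hn : segs = []
          · subst hn
            simp [pvJoin_nil, pvJoin_singleton]
          · have hne := pvJoin_ne_empty segs hn hmem
            simp [hne, pvJoin_append segs seg hn]
        rw [hA, hB]
        refine ih (segs ++ [seg]) ?_
        intro hm
        rcases List.mem_append.mp hm with h | h
        · exact hmem h
        · simp at h; exact h0 h

theorem pvFill_aux (hs : List String) (cols : Nat) (hh : hs.length = cols) :
    ∀ m, m ≤ cols →
    (List.range m).foldl
      (fun (hs : List String) i =>
        if hs.getD i "" = "" then hs.set i ("col_" ++ PySem.Int.toStr ((i : Int) + 1)) else hs)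
      hs
    = (List.range m).map
        (fun i => if hs.getD i "" = "" then "col_" ++ PySem.Int.toStr ((i : Int) + 1) else hs.getD i "")
      ++ hs.drop m := by
  intro m hm
  induction m with
  | zero => simp
  | succ k ih =>
    have hk : k ≤ cols := by omega
    have hkh : k < hs.length := by omega
    have hlen : ((List.range k).map
        (fun i => if hs.getD i "" = "" then "col_" ++ PySem.Int.toStr ((i : Int) + 1) else hs.getD i "")).length = k := by simp
    have hdrop : hs.drop k = hs.getD k "" :: hs.drop (k + 1) := by
      rw [List.drop_eq_getElem_cons hkh, List.getD_eq_getElem hs "" hkh]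
    have hget : ∀ (P : List String), P.length = k → (P ++ hs.drop k).getD k "" = hs.getD k "" := by
      intro P hP
      rw [hdrop, List.getD_eq_getElem?_getD, List.getElem?_append_right (by omega), hP]
      simp
    have hset : ∀ (P : List String) v, P.length = k → (P ++ hs.drop k).set k v = P ++ v :: hs.drop (k + 1) := by
      intro P v hP
      rw [hdrop, List.set_append, hP]
      simp
    rw [List.range_succ, List.foldl_append, ih hk, List.foldl_cons, List.foldl_nil,
      List.map_append, List.map_singleton]
    rw [hget _ hlen]
    by_cases he : hs.getD k "" = ""
    · rw [if_pos he, if_pos he, hset _ _ hlen, List.append_assoc, List.singleton_append]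
    · rw [if_neg he, if_neg he, List.append_assoc, List.singleton_append, ← hdrop]

theorem pvFoldRange_getD {α β : Type} (l : List α) (d : α) (F : β → α → β) :
    ∀ n, n ≤ l.length → ∀ init, (List.range n).foldl (fun st k => F st (l.getD k d)) init
      = (l.take n).foldl F init := by
  intro n hn
  induction n with
  | zero => intro init; simp
  | succ k ih =>
    intro init
    have hk : k < l.length := by omega
    rw [List.range_succ, List.foldl_append, ih (by omega), List.foldl_cons, List.foldl_nil,
      List.take_add_one, List.foldl_append]
    rw [List.getElem?_eq_getElem hk]
    simp [List.getElem?_eq_getElem hk]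

theorem pvOuterMap (cols : Nat) (L : List (List String)) (c : Nat)
    (row : List String) :
    pvColA cols (L ++ [row]) c = pvStepA (pvColA cols L c) ((pvPropRow cols row).1.getD c "") := by
  simp [pvColA, List.foldl_append]

theorem pvOuter (cols : Nat) (L : List (List String)) :
    L.foldl
      (fun (st : List String × List (Option String)) layer =>
        (List.range cols).foldl
          (fun (st : List String × List (Option String)) c =>
            let seg := (pvPropRow cols layer).1.getD c ""
            if seg = "" then st
            else if st.2.getD c none = some seg then st
            else (st.1.set c (if st.1.getD c "" = "" then seg else st.1.getD c "" ++ " > " ++ seg),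
                  st.2.set c (some seg)))
          st)
      (List.replicate cols "", List.replicate cols none)
    = ((List.range cols).map (fun c => (pvColA cols L c).1),
       (List.range cols).map (fun c => (pvColA cols L c).2)) := by
  induction L using List.reverseRecOn with
  | nil =>
    simp only [List.foldl_nil]
    refine Prod.ext ?_ ?_ <;>
      simp [pvColA, List.map_const']
  | append_singleton L row ih =>
    rw [List.foldl_append, List.foldl_cons, List.foldl_nil, ih,
      pvJoinA_eq _ cols _ _ (by simp) (by simp)]
    refine Prod.ext ?_ ?_ <;>
    · simp only []
      refine List.map_congr_left ?_
      intro c hc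
      have hclt : c < cols := List.mem_range.mp hc
      rw [List.getD_eq_getElem _ _ (by simpa using hclt), List.getD_eq_getElem _ _ (by simpa using hclt)]
      simp [pvOuterMap]

theorem pvA_eq (grid : List (List String)) (header_layers : Int) (hg : grid ≠ []) :
    flatten_header_layers_py grid header_layers
    = (List.range grid.headI.length).map (fun i =>
        if (pvColA grid.headI.length (grid.take (min header_layers (grid.length : Int)).toNat) i).1 = ""
        then "col_" ++ PySem.Int.toStr ((i : Int) + 1)
        else (pvColA grid.headI.length (grid.take (min header_layers (grid.length : Int)).toNat) i).1) := by
  rw [flatten_header_layers_py, if_neg hg]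
  simp only [PySem.List.pyRange_one, sub_zero, List.foldl_map, zero_add,
    PySem.List.pyGetD_natCast, pvPropA_eq]
  have hn : (min header_layers (grid.length : Int)).toNat ≤ grid.length := by omega
  have hX := (pvFoldRange_getD grid ([] : List String)
      (fun (st : List String × List (Option String)) (layer : List String) =>
        (List.range grid.headI.length).foldl
          (fun (st : List String × List (Option String)) c =>
            let seg := (pvPropRow grid.headI.length layer).1.getD c ""
            if seg = "" then st
            else if st.2.getD c none = some seg then st
            else (st.1.set c (if st.1.getD c "" = "" then seg else st.1.getD c "" ++ " > " ++ seg),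
                  st.2.set c (some seg)))
          st)
      (min header_layers (grid.length : Int)).toNat hn
      (List.replicate grid.headI.length "", List.replicate grid.headI.length none)).trans
      (pvOuter grid.headI.length (grid.take (min header_layers (grid.length : Int)).toNat))
  beta_reduce at hX
  rw [hX]
  have hfill := pvFill_aux
      ((List.range grid.headI.length).map
        (fun c => (pvColA grid.headI.length (List.take (min header_layers (grid.length : Int)).toNat grid) c).1))
      grid.headI.length (by simp) grid.headI.length le_rfl
  rw [hfill, List.drop_eq_nil_of_le (by simp), List.append_nil]
  refine List.map_congr_left ?_
  intro c hc
  have hclt : c < grid.headI.length := List.mem_range.mp hc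
  rw [List.getD_eq_getElem _ _ (by simpa using hclt)]
  simp

theorem pvColAB (cols : Nat) (L : List (List String)) (c : Nat) :
    pvColA cols L c = (pvJoinH (pvColB cols L c), (pvColB cols L c).getLast?)
    ∧ "" ∉ pvColB cols L c := by
  have h := pvCol_inv (L.map (fun row => (pvPropRow cols row).1.getD c "")) [] (by simp)
  rw [List.foldl_map, List.foldl_map] at h
  have hinit : (pvJoinH [], ([] : List String).getLast?) = ("", none) := by rw [pvJoin_nil]; rfl
  rw [hinit] at h
  exact h

-- ========== B-side machinery ==========

-- the run list of a (truncated) header row: (start index, stripped label) of non-empty cells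
def pvBpOf (t : List String) : List (Int × String) :=
  ((PySem.List.enumerate t).filter (fun p => decide (PySem.Str.strip p.2 ≠ ""))).map
    (fun p => (p.1, PySem.Str.strip p.2))

-- the fill value: last non-empty stripped cell of a prefix
def pvFillT (t : List String) (n : Nat) : String :=
  (t.take n).foldl (fun cur s => if PySem.Str.strip s ≠ "" then PySem.Str.strip s else cur) ""

-- the label of the last run starting at or before column c
def pvPick (c : Nat) (bp : List (Int × String)) : String :=
  (((bp.filter (fun p => decide (p.1 ≤ (c : Int)))).getLast?).map (·.2)).getD ""

theorem pvBp_lemmas (t : List String) :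
    (pvBpOf t).Pairwise (fun p q => p.1 < q.1)
    ∧ (∀ p ∈ pvBpOf t, 0 ≤ p.1 ∧ p.1 < (t.length : Int) ∧ p.2 ≠ "") := by
  constructor
  · unfold pvBpOf
    rw [List.pairwise_map]
    exact (PySem.List.pairwise_lt_enumerate t 0).filter _
  · intro p hp
    unfold pvBpOf at hp
    rw [List.mem_map] at hp
    obtain ⟨q, hq, rfl⟩ := hp
    rw [List.mem_filter] at hq
    obtain ⟨hqe, hqP⟩ := hq
    rw [PySem.List.mem_enumerate_iff] at hqe
    obtain ⟨k, hk, rfl⟩ := hqe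
    refine ⟨by simp, by simp; exact_mod_cast hk, by simpa using hqP⟩

theorem pvSL_aux (L : List (Int × String)) :
    ∀ (acc : List Int × List String),
    L.foldl
      (fun (sl : List Int × List String) p =>
        let s := PySem.Str.strip p.2
        if s ≠ "" then (sl.1 ++ [p.1], sl.2 ++ [s]) else sl)
      acc
    = (acc.1 ++ ((L.filter (fun p => decide (PySem.Str.strip p.2 ≠ ""))).map (fun p => (p.1, PySem.Str.strip p.2))).map (·.1),
       acc.2 ++ ((L.filter (fun p => decide (PySem.Str.strip p.2 ≠ ""))).map (fun p => (p.1, PySem.Str.strip p.2))).map (·.2)) := by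
  induction L with
  | nil => intro acc; simp
  | cons p L ih =>
    intro acc
    rw [List.foldl_cons]
    by_cases h : PySem.Str.strip p.2 = ""
    · rw [if_neg (by simp [h]), List.filter_cons_of_neg (by simp [h])]
      exact ih acc
    · rw [if_pos h, List.filter_cons_of_pos (by simpa using h), ih]
      simp

-- B's per-row loop builds exactly the run list, split into its two components
theorem pvSL_eq (t : List String) :
    (PySem.List.enumerate t).foldl
      (fun (sl : List Int × List String) p =>
        let s := PySem.Str.strip p.2
        if s ≠ "" then (sl.1 ++ [p.1], sl.2 ++ [s]) else sl)
      ([], [])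
    = ((pvBpOf t).map (·.1), (pvBpOf t).map (·.2)) := by
  rw [pvSL_aux]
  simp [pvBpOf]

-- binary-search invariant for Source B's hand-rolled bisect_right
theorem pvBisectR_inv (a : List Int) (x : Int)
    (hmono : ∀ i j, i ≤ j → j < a.length → a.getD i 0 ≤ a.getD j 0) :
    ∀ (n lo hi : Nat), hi - lo ≤ n → lo ≤ hi → hi ≤ a.length →
    (∀ i, i < lo → a.getD i 0 ≤ x) → (∀ i, hi ≤ i → i < a.length → x < a.getD i 0) →
    lo ≤ pvBisectR a x lo hi ∧ pvBisectR a x lo hi ≤ hi ∧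
    (∀ i, i < pvBisectR a x lo hi → a.getD i 0 ≤ x) ∧
    (∀ i, pvBisectR a x lo hi ≤ i → i < a.length → x < a.getD i 0) := by
  intro n
  induction n with
  | zero =>
    intro lo hi hfuel hle hhi hlow hhigh
    have : lo = hi := by omega
    subst this
    rw [pvBisectR, if_neg (by omega)]
    exact ⟨le_rfl, le_rfl, hlow, hhigh⟩
  | succ n ih =>
    intro lo hi hfuel hle hhi hlow hhigh
    rw [pvBisectR]
    by_cases hlt : lo < hi
    · rw [if_pos hlt]
      simp only []
      set mid := (lo + hi) / 2 with hmid
      have hmlo : lo ≤ mid := by omega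
      have hmhi : mid < hi := by omega
      by_cases hx : x < a.getD mid 0
      · rw [if_pos hx]
        have hres := ih lo mid (by omega) hmlo (by omega) hlow
          (fun i hmi hil => lt_of_lt_of_le hx (hmono mid i hmi hil))
        exact ⟨hres.1, le_trans hres.2.1 (le_of_lt hmhi), hres.2.2⟩
      · rw [if_neg hx]
        rw [not_lt] at hx
        have hlow' : ∀ i, i < mid + 1 → a.getD i 0 ≤ x := by
          intro i hi'
          rcases lt_or_ge i lo with h | h
          · exact hlow i h
          · exact le_trans (hmono i mid (by omega) (by omega)) hx
        have hres := ih (mid + 1) hi (by omega) (by omega) hhi hlow' hhigh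
        exact ⟨le_trans (by omega) hres.1, hres.2.1, hres.2.2⟩
    · rw [if_neg hlt]
      have : lo = hi := by omega
      subst this
      exact ⟨le_rfl, le_rfl, hlow, hhigh⟩

-- with the split characterization, the ≤-filter is a prefix
theorem pvFilter_take {α : Type} (l : List α) (P : α → Bool) (r : Nat) (hr : r ≤ l.length)
    (h1 : ∀ j (hj : j < l.length), j < r → P l[j])
    (h2 : ∀ j (hj : j < l.length), r ≤ j → ¬ P l[j]) :
    l.filter P = l.take r := by
  conv_lhs => rw [← List.take_append_drop r l]
  rw [List.filter_append]
  have ht : (l.take r).filter P = l.take r := by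
    rw [List.filter_eq_self]
    intro a ha
    rw [List.mem_iff_getElem] at ha
    obtain ⟨i, hi, rfl⟩ := ha
    have hi' : i < r := by simp at hi; omega
    rw [List.getElem_take]
    exact h1 i (by omega) hi'
  have hd : (l.drop r).filter P = [] := by
    rw [List.filter_eq_nil_iff]
    intro a ha
    rw [List.mem_iff_getElem] at ha
    obtain ⟨i, hi, rfl⟩ := ha
    rw [List.getElem_drop]
    exact h2 (r + i) (by simp at hi; omega) (by omega)
  rw [ht, hd, List.append_nil]

-- run list of a row extended on the right
theorem pvBpOf_append (u : List String) (s : String) :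
    pvBpOf (u ++ [s])
    = pvBpOf u ++ (if PySem.Str.strip s ≠ "" then [((u.length : Int), PySem.Str.strip s)] else []) := by
  unfold pvBpOf
  rw [PySem.List.enumerate_append, PySem.List.enumerate_cons, PySem.List.enumerate_nil,
    List.filter_append, List.map_append]
  congr 1
  by_cases h : PySem.Str.strip s = ""
  · rw [if_neg (by simp [h])]
    simp [h]
  · rw [if_pos h]
    simp [h]

-- pvFillT equals pvPick (reverse induction on the row)
theorem pvFill_pick (t : List String) (c : Nat) :
    pvFillT t (c + 1) = pvPick c (pvBpOf t) := by
  induction t using List.reverseRecOn with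
  | nil => simp [pvFillT, pvPick, pvBpOf, PySem.List.enumerate_nil]
  | append_singleton u s ih =>
    rw [pvBpOf_append]
    by_cases hcu : c < u.length
    · have h1 : (u ++ [s]).take (c + 1) = u.take (c + 1) :=
        List.take_append_of_le_length (by omega)
      have h2 : (if PySem.Str.strip s ≠ "" then [((u.length : Int), PySem.Str.strip s)] else []).filter
          (fun p => decide (p.1 ≤ (c : Int))) = [] := by
        by_cases h : PySem.Str.strip s = ""
        · rw [if_neg (by simp [h])]
          rfl
        · rw [if_pos h]
          simp only [List.filter_cons, List.filter_nil]
          rw [if_neg (by simp; omega)]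
      unfold pvFillT pvPick
      rw [h1, List.filter_append, h2, List.append_nil]
      exact ih
    · rw [not_lt] at hcu
      have h1 : (u ++ [s]).take (c + 1) = u ++ [s] :=
        List.take_of_length_le (by simp; omega)
      have h1u : u.take (c + 1) = u := List.take_of_length_le (by omega)
      have hfu : pvFillT (u ++ [s]) (c + 1)
          = (if PySem.Str.strip s ≠ "" then PySem.Str.strip s else pvFillT u (c + 1)) := by
        unfold pvFillT
        rw [h1, List.foldl_append, List.foldl_cons, List.foldl_nil, h1u]
      rw [hfu, ih]
      by_cases h : PySem.Str.strip s = ""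
      · rw [if_neg (by simp [h]), if_neg (by simp [h]), List.append_nil]
      · rw [if_pos h, if_pos h]
        unfold pvPick
        rw [List.filter_append]
        have hkeep : ([((u.length : Int), PySem.Str.strip s)]).filter (fun p => decide (p.1 ≤ (c : Int)))
            = [((u.length : Int), PySem.Str.strip s)] := by
          simp only [List.filter_cons, List.filter_nil]
          rw [if_pos (by simp; omega)]
        rw [hkeep, List.getLast?_concat]
        rfl

-- the value A's propagation fold threads through index j
def pvFillR (row : List String) (n : Nat) : String :=
  (List.range n).foldl
    (fun cur j => if PySem.Str.strip (row.getD j "") ≠ "" then PySem.Str.strip (row.getD j "") else cur) ""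

theorem pvPropRow_spec (row : List String) (cols : Nat) :
    pvPropRow cols row = ((List.range cols).map (fun j => pvFillR row (j + 1)), pvFillR row cols) := by
  unfold pvPropRow
  induction cols with
  | zero => simp [pvFillR]
  | succ k ih =>
    rw [List.range_succ, List.foldl_append, ih, List.foldl_cons, List.foldl_nil,
      List.map_append, List.map_singleton]
    have hfill : pvFillR row (k + 1)
        = (if PySem.Str.strip (row.getD k "") ≠ "" then PySem.Str.strip (row.getD k "") else pvFillR row k) := by
      unfold pvFillR
      rw [List.range_succ, List.foldl_append, List.foldl_cons, List.foldl_nil]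
    refine Prod.ext ?_ ?_ <;> simp only [] <;> rw [← hfill]

-- A's propagated value at column c is the fill value of the truncated row
theorem pvProp_fill (row : List String) (cols : Nat) (c : Nat) (hc : c < cols)
    (hlen : cols ≤ row.length) :
    (pvPropRow cols row).1.getD c "" = pvFillT (row.take cols) (c + 1) := by
  rw [pvPropRow_spec]
  simp only []
  rw [List.getD_eq_getElem _ _ (by simpa using hc), List.getElem_map, List.getElem_range]
  have h1 : pvFillR row (c + 1)
      = (row.take (c + 1)).foldl (fun cur s => if PySem.Str.strip s ≠ "" then PySem.Str.strip s else cur) "" := by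
    unfold pvFillR
    exact pvFoldRange_getD row ""
      (fun cur s => if PySem.Str.strip s ≠ "" then PySem.Str.strip s else cur) (c + 1) (by omega) ""
  have h2 : (row.take cols).take (c + 1) = row.take (c + 1) := by
    rw [List.take_take]
    congr 1
    omega
  rw [h1]
  unfold pvFillT
  rw [h2]

-- the heart: Source B's bisect lookup on the run list equals A's forward-fill value
theorem pvSeg_full (row : List String) (cols c : Nat) (hc : c < cols) (hlen : cols ≤ row.length) :
    (pvBisectR ((pvBpOf (row.take cols)).map (·.1)) (Int.ofNat c) 0 ((pvBpOf (row.take cols)).map (·.1)).length = 0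
      → (pvPropRow cols row).1.getD c "" = "")
    ∧ (pvBisectR ((pvBpOf (row.take cols)).map (·.1)) (Int.ofNat c) 0 ((pvBpOf (row.take cols)).map (·.1)).length ≠ 0
      → ((pvBpOf (row.take cols)).map (·.2)).getD
            (pvBisectR ((pvBpOf (row.take cols)).map (·.1)) (Int.ofNat c) 0 ((pvBpOf (row.take cols)).map (·.1)).length - 1) ""
          = (pvPropRow cols row).1.getD c ""
        ∧ ((pvBpOf (row.take cols)).map (·.2)).getD
            (pvBisectR ((pvBpOf (row.take cols)).map (·.1)) (Int.ofNat c) 0 ((pvBpOf (row.take cols)).map (·.1)).length - 1) ""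
          ≠ "") := by
  obtain ⟨hpw, hmem⟩ := pvBp_lemmas (row.take cols)
  set bp := pvBpOf (row.take cols) with hbp
  set a := bp.map (fun p => p.1) with ha
  have hlen_a : a.length = bp.length := by simp [ha]
  have haj : ∀ j, (hj : j < bp.length) → a[j]'(by omega) = (bp[j]'hj).1 := by
    intro j hj
    simp [ha]
  have hmono : ∀ i j, i ≤ j → j < a.length → a.getD i 0 ≤ a.getD j 0 := by
    intro i j hij hj
    rcases eq_or_lt_of_le hij with rfl | hlt
    · exact le_rfl
    · rw [List.getD_eq_getElem _ _ (by omega), List.getD_eq_getElem _ _ (by omega),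
        haj i (by omega), haj j (by omega)]
      exact le_of_lt (List.pairwise_iff_getElem.mp hpw i j (by omega) (by omega) hlt)
  have hinv := pvBisectR_inv a (Int.ofNat c) hmono a.length 0 a.length (by omega) (by omega)
    le_rfl (by omega) (by omega)
  set r := pvBisectR a (Int.ofNat c) 0 a.length with hr
  obtain ⟨-, hrle, hlow, hhigh⟩ := hinv
  have hfil : bp.filter (fun p => decide (p.1 ≤ (c : Int))) = bp.take r := by
    apply pvFilter_take bp _ r (by omega)
    · intro j hj hjr
      have := hlow j (by omega)
      rw [List.getD_eq_getElem _ _ (by omega), haj j hj] at this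
      simpa using this
    · intro j hj hjr
      have := hhigh j (by omega) (by omega)
      rw [List.getD_eq_getElem _ _ (by omega), haj j hj] at this
      simp only [decide_eq_true_eq, not_le]
      omega
  have hpickfill : (pvPropRow cols row).1.getD c "" = pvPick c bp := by
    rw [pvProp_fill row cols c hc hlen, pvFill_pick]
  constructor
  · intro hr0
    rw [hpickfill]
    unfold pvPick
    rw [hfil, hr0]
    simp
  · intro hr0
    have hrlt : r - 1 < bp.length := by omega
    have hget : ((bp.take r).getLast?) = some (bp[r - 1]'hrlt) := by
      rw [List.getLast?_eq_getElem?]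
      have hlt : (bp.take r).length = r := by simp; omega
      rw [hlt, List.getElem?_take_of_lt (by omega), List.getElem?_eq_getElem (by omega)]
    have hlab : (bp.map (fun p => p.2)).getD (r - 1) "" = (bp[r - 1]'hrlt).2 := by
      rw [List.getD_eq_getElem _ _ (by simpa using hrlt), List.getElem_map]
    constructor
    · rw [hlab, hpickfill]
      unfold pvPick
      rw [hfil, hget]
      rfl
    · rw [hlab]
      exact (hmem _ (List.getElem_mem hrlt)).2.2

-- B's whole result, reduced to the reference per-column segment folds
set_option maxHeartbeats 1000000 in
theorem pvB_eq (grid : List (List String)) (header_layers : Int) (hg : grid ≠ [])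
    (hpre : Pre_flatten_header_layers_py grid header_layers) :
    flatten_header_layers_py_alt grid header_layers
    = (List.range grid.headI.length).map (fun c =>
        if pvColB grid.headI.length (grid.take (min header_layers (grid.length : Int)).toNat) c ≠ []
        then pvJoinH (pvColB grid.headI.length (grid.take (min header_layers (grid.length : Int)).toNat) c)
        else "col_" ++ PySem.Int.toStr (Int.ofNat c + 1)) := by
  rw [flatten_header_layers_py_alt, if_neg hg]
  simp only [PySem.List.pyRange_one, sub_zero, List.foldl_map, zero_add,
    PySem.List.pyGetD_natCast]
  have hn : (min header_layers (grid.length : Int)).toNat ≤ grid.length := by omega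
  have hrows := pvFoldRange_getD grid ([] : List String)
      (fun (rows : List (List Int × List String)) (row : List String) =>
        rows ++ [(PySem.List.enumerate (PySem.List.slice row none (some (grid.headI.length : Int)))).foldl
          (fun (sl : List Int × List String) p =>
            let s := PySem.Str.strip p.2
            if s ≠ "" then (sl.1 ++ [p.1], sl.2 ++ [s]) else sl)
          ([], [])])
      (min header_layers (grid.length : Int)).toNat hn []
  beta_reduce at hrows
  rw [hrows, PySem.List.foldl_append_singleton_eq_map, List.nil_append]
  refine List.map_congr_left ?_
  intro c hc
  have hclt : c < grid.headI.length := List.mem_range.mp hc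
  simp only []
  rw [List.foldl_map]
  have hfold : (grid.take (min header_layers (grid.length : Int)).toNat).foldl
      (fun (parts : List String) (row : List String) =>
        let sl := (PySem.List.enumerate (PySem.List.slice row none (some (grid.headI.length : Int)))).foldl
          (fun (sl : List Int × List String) p =>
            let s := PySem.Str.strip p.2
            if s ≠ "" then (sl.1 ++ [p.1], sl.2 ++ [s]) else sl)
          ([], [])
        let i := pvBisectR sl.1 (Int.ofNat c) 0 sl.1.length
        if i ≠ 0 ∧ (parts = [] ∨ parts.getLast? ≠ some (sl.2.getD (i - 1) ""))
        then parts ++ [sl.2.getD (i - 1) ""] else parts)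
      []
      = pvColB grid.headI.length (grid.take (min header_layers (grid.length : Int)).toNat) c := by
    unfold pvColB
    apply PySem.List.foldl_congr_mem
    intro parts row hrow
    have hrlen : grid.headI.length ≤ row.length := hpre row hrow
    have hslice : PySem.List.slice row none (some (grid.headI.length : Int)) = row.take grid.headI.length := by
      rw [PySem.List.slice_to row (by positivity)]
      simp
    simp only [hslice, pvSL_eq]
    show (if pvBisectR ((pvBpOf (row.take grid.headI.length)).map (fun x => x.1)) (Int.ofNat c) 0
              ((pvBpOf (row.take grid.headI.length)).map (fun x => x.1)).length ≠ 0
            ∧ (parts = [] ∨ parts.getLast? ≠ some (((pvBpOf (row.take grid.headI.length)).map (fun x => x.2)).getD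
                (pvBisectR ((pvBpOf (row.take grid.headI.length)).map (fun x => x.1)) (Int.ofNat c) 0
                  ((pvBpOf (row.take grid.headI.length)).map (fun x => x.1)).length - 1) ""))
          then parts ++ [((pvBpOf (row.take grid.headI.length)).map (fun x => x.2)).getD
                (pvBisectR ((pvBpOf (row.take grid.headI.length)).map (fun x => x.1)) (Int.ofNat c) 0
                  ((pvBpOf (row.take grid.headI.length)).map (fun x => x.1)).length - 1) ""]
          else parts)
        = pvStepB parts ((pvPropRow grid.headI.length row).1.getD c "")
    obtain ⟨hzero, hpos⟩ := pvSeg_full row grid.headI.length c hclt hrlen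
    by_cases h0 : pvBisectR ((pvBpOf (row.take grid.headI.length)).map (fun x => x.1)) (Int.ofNat c) 0
        ((pvBpOf (row.take grid.headI.length)).map (fun x => x.1)).length = 0
    · rw [if_neg (fun hcond => hcond.1 h0), hzero h0]
      simp [pvStepB]
    · obtain ⟨hseg, hne⟩ := hpos h0
      rw [← hseg]
      unfold pvStepB
      by_cases hC : parts = [] ∨ parts.getLast? ≠ some (((pvBpOf (row.take grid.headI.length)).map (fun x => x.2)).getD
          (pvBisectR ((pvBpOf (row.take grid.headI.length)).map (fun x => x.1)) (Int.ofNat c) 0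
            ((pvBpOf (row.take grid.headI.length)).map (fun x => x.1)).length - 1) "")
      · rw [if_pos ⟨h0, hC⟩, if_pos ⟨hne, hC⟩]
      · rw [if_neg (fun h => hC h.2), if_neg (fun h => hC h.2)]
  rw [hfold]
  rfl

-- ===== VERDICT (by name: the statement is the Claim_ definition above) =====
theorem flatten_header_layers_py_spec : Claim_equal_flatten_header_layers_py := by
  intro grid header_layers _dom hpre
  unfold Spec_flatten_header_layers_py
  by_cases hg : grid = []
  · simp [flatten_header_layers_py, flatten_header_layers_py_alt, hg]
  · rw [pvA_eq grid header_layers hg, pvB_eq grid header_layers hg hpre]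
    refine List.map_congr_left ?_
    intro c hc
    obtain ⟨hAB, hmem⟩ := pvColAB grid.headI.length (grid.take (min header_layers (grid.length : Int)).toNat) c
    rw [hAB]
    by_cases hnil : pvColB grid.headI.length (grid.take (min header_layers (grid.length : Int)).toNat) c = []
    · simp [hnil, pvJoin_nil]
    · have hne := pvJoin_ne_empty _ hnil hmem
      simp [hnil, hne]
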